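-- pv_equiv track=rewrite | github.com/dominikjalowiecki/Programming-Projects | python/ex_traveling_robot/skrypt.py | podaj_gracza_z_najwieksza_liczba_punktow
-- ===== SOURCE A (Python) =====
-- def wykonaj_ruch(ruch, pozycja):
--     if ruch == 'N':
--         pozycja[0] -= 1
--     if ruch == 'E':
--         pozycja[1] += 1
--     if ruch == 'S':
--         pozycja[0] += 1
--     if ruch == 'W':
--         pozycja[1] -= 1
--
-- def podaj_gracza_z_najwieksza_liczba_punktow(ruchy, plansza):
--     pozycja = [0, 0]
--     numer_gracza = 0
--     najwieksza_liczba_punktow = 0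
--     liczba_punktow = 0
--
--     for indeks_gracza in range(len(ruchy)):
--         pozycja = [0, 0]
--         liczba_punktow = plansza[0][0]
--
--         for ruch in ruchy[indeks_gracza]:
--             wykonaj_ruch(ruch, pozycja)
--             if (pozycja[0] < 0 or pozycja[0] > 19) or (pozycja[1] < 0 or pozycja[1] > 19):
--                 liczba_punktow = -1
--                 break
--             liczba_punktow += plansza[pozycja[0]][pozycja[1]]
--
--         if liczba_punktow > najwieksza_liczba_punktow:
--             numer_gracza = indeks_gracza+1
--             najwieksza_liczba_punktow = liczba_punktow
--
--     return [numer_gracza, najwieksza_liczba_punktow]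
-- ===== SOURCE B (Python) =====
-- def podaj_gracza_z_najwieksza_liczba_punktow(ruchy, plansza):
--     DELTY = {'N': (-1, 0), 'E': (0, 1), 'S': (1, 0), 'W': (0, -1)}
--
--     def sciezka(ruchy_gracza):
--         poz = [(0, 0)]
--         for ruch in ruchy_gracza:
--             dw, dk = DELTY.get(ruch, (0, 0))
--             poz.append((poz[-1][0] + dw, poz[-1][1] + dk))
--         return poz[1:]
--
--     def punkty_gracza(ruchy_gracza):
--         kroki = sciezka(ruchy_gracza)
--         if all(0 <= w <= 19 and 0 <= k <= 19 for w, k in kroki):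
--             return plansza[0][0] + sum(plansza[w][k] for w, k in kroki)
--         return -1
--
--     punkty = [punkty_gracza(r) for r in ruchy]
--     if punkty:
--         naj = max(punkty)
--         if naj > 0:
--             return [punkty.index(naj) + 1, naj]
--     return [0, 0]
-- ===== Notes on version B (the rewrite author's own statement) =====
-- stated objective: alternative
-- what changed: A interleaves simulation, bounds checking, scoring and the running max in one nested loop with a break; B stages the work: it materialises each player's whole path first, scores it with whole-list all()/sum() passes (no early break, no running position-score state), and selects the winner with built-in max() and .index() instead of a running-best fold.
import Mathlib
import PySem

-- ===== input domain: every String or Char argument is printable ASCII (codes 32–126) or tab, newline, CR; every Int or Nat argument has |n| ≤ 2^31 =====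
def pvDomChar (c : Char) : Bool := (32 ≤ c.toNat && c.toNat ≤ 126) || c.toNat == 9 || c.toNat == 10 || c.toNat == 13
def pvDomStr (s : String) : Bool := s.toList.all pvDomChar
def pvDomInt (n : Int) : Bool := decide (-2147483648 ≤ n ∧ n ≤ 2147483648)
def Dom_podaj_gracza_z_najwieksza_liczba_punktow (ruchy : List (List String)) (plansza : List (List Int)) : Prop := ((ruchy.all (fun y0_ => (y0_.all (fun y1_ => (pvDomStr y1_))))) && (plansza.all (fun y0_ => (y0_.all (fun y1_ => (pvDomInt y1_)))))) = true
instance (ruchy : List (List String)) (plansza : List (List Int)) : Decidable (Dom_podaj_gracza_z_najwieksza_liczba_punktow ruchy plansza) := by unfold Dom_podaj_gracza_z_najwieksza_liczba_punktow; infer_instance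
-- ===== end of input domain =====

-- B re-implements A by staging: it materialises each player's whole path (a scan of direction
-- deltas), scores it with whole-list all/sum passes, then picks the winner with max/index instead
-- of a running-best fold (objective: alternative; same asymptotic cost). Return values proved
-- equal on Pre_ (the inputs where the Python A returns without an IndexError).


-- ===== PORT A =====
-- wykonaj_ruch mutates pozycja; ported as a function returning the new position (value-level, exact)
def pvA_wykonaj_ruch (ruch : String) (pozycja : Int × Int) : Int × Int :=
  let p1 := if ruch = "N" then (pozycja.1 - 1, pozycja.2) else pozycja
  let p2 := if ruch = "E" then (p1.1, p1.2 + 1) else p1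
  let p3 := if ruch = "S" then (p2.1 + 1, p2.2) else p2
  if ruch = "W" then (p3.1, p3.2 - 1) else p3

-- A's inner 'for ruch in ruchy[indeks_gracza]' loop with its break; the out-of-range default 0/[]
-- of pyGetD is never reached under Pre_ (Python would raise IndexError there)
def pvA_inner (plansza : List (List Int)) : List String → Int × Int → Int → Int
  | [], _, liczba => liczba
  | ruch :: rest, pozycja, liczba =>
    let p := pvA_wykonaj_ruch ruch pozycja
    if p.1 < 0 ∨ p.1 > 19 ∨ p.2 < 0 ∨ p.2 > 19 then -1
    else pvA_inner plansza rest p (liczba + PySem.List.pyGetD (PySem.List.pyGetD plansza p.1 []) p.2 0)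

def podaj_gracza_z_najwieksza_liczba_punktow (ruchy : List (List String)) (plansza : List (List Int)) : List Int :=
  let wynik := (PySem.List.pyRange 0 (ruchy.length : Int) 1).foldl
    (fun (st : Int × Int) indeks_gracza =>
      let liczba := pvA_inner plansza (PySem.List.pyGetD ruchy indeks_gracza []) (0, 0)
        (PySem.List.pyGetD (PySem.List.pyGetD plansza 0 []) 0 0)
      if liczba > st.2 then (indeks_gracza + 1, liczba) else st) (0, 0)
  [wynik.1, wynik.2]

-- ===== PORT B =====
def pvB_delty : PySem.Dict String (Int × Int) :=
  PySem.Dict.ofList [("N", (-1, 0)), ("E", (0, 1)), ("S", (1, 0)), ("W", (0, -1))]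

-- sciezka: the append loop materialising all positions after each move (poz[1:]); ported as scanl + tail
def pvB_sciezka (ruchy_gracza : List String) : List (Int × Int) :=
  (List.scanl
    (fun p r =>
      let d := PySem.Dict.getD pvB_delty r (0, 0)
      (p.1 + d.1, p.2 + d.2)) ((0 : Int), (0 : Int)) ruchy_gracza).tail

def pvB_inB (p : Int × Int) : Bool := decide (0 ≤ p.1 ∧ p.1 ≤ 19 ∧ 0 ≤ p.2 ∧ p.2 ≤ 19)

def pvB_punkty_gracza (plansza : List (List Int)) (ruchy_gracza : List String) : Int :=
  let kroki := pvB_sciezka ruchy_gracza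
  if kroki.all pvB_inB then
    PySem.List.pyGetD (PySem.List.pyGetD plansza 0 []) 0 0 +
      (kroki.map (fun p => PySem.List.pyGetD (PySem.List.pyGetD plansza p.1 []) p.2 0)).sum
  else -1

def podaj_gracza_z_najwieksza_liczba_punktow_alt (ruchy : List (List String)) (plansza : List (List Int)) : List Int :=
  let punkty := ruchy.map (pvB_punkty_gracza plansza)
  match PySem.List.max? punkty (fun x => x) with
  | some naj =>
    if naj > 0 then [(((PySem.List.index? punkty naj).getD 0 : Nat) : Int) + 1, naj] else [0, 0]
  | none => [0, 0]

-- ===== PRECONDITION & SPEC =====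
-- helpers for Pre_ only (independent of both ports): positions after each nonempty move prefix
def pvPreDelta (r : String) : Int × Int :=
  if r = "N" then (-1, 0) else if r = "E" then (0, 1)
  else if r = "S" then (1, 0) else if r = "W" then (0, -1) else (0, 0)

def pvPrePos (m : List String) : List (Int × Int) :=
  (m.scanl (fun p r => (p.1 + (pvPreDelta r).1, p.2 + (pvPreDelta r).2)) ((0 : Int), (0 : Int))).tail

def pvPreInB (p : Int × Int) : Bool := decide (0 ≤ p.1 ∧ p.1 ≤ 19 ∧ 0 ≤ p.2 ∧ p.2 ≤ 19)

def pvPreCellOk (plansza : List (List Int)) (p : Int × Int) : Bool :=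
  match plansza[p.1.toNat]? with
  | some row => p.2.toNat < row.length
  | none => false

-- Pre_ = exactly the inputs where the Python A returns (no IndexError): either no players, or the
-- start cell exists and every cell read exists. Both ports are total via the same pyGetD defaults,
-- so the Lean equality needs no hypothesis; Pre_ delimits where the claim speaks for the Python A.
-- ("every cell read" = prefix positions of the walk, cut at the first one outside 0..19).
def Pre_podaj_gracza_z_najwieksza_liczba_punktow (ruchy : List (List String)) (plansza : List (List Int)) : Prop :=
  ruchy = [] ∨ (0 < plansza.length ∧ 0 < (plansza.headD []).length ∧
    ∀ m ∈ ruchy, ∀ p ∈ (pvPrePos m).takeWhile pvPreInB, pvPreCellOk plansza p = true)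
instance (ruchy : List (List String)) (plansza : List (List Int)) : Decidable (Pre_podaj_gracza_z_najwieksza_liczba_punktow ruchy plansza) := by unfold Pre_podaj_gracza_z_najwieksza_liczba_punktow; infer_instance

def pvWitness_podaj_gracza_z_najwieksza_liczba_punktow : List (List String) × List (List Int) :=
  ([["N"], ["E", "x"]], [[1, 2], [3, 4]])

def Spec_podaj_gracza_z_najwieksza_liczba_punktow (ruchy : List (List String)) (plansza : List (List Int)) (out : List Int) : Prop := out = podaj_gracza_z_najwieksza_liczba_punktow_alt ruchy plansza
instance (ruchy : List (List String)) (plansza : List (List Int)) (out : List Int) : Decidable (Spec_podaj_gracza_z_najwieksza_liczba_punktow ruchy plansza out) := by unfold Spec_podaj_gracza_z_najwieksza_liczba_punktow; infer_instance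

-- ===== CLAIM (what is proved, stated in full; the proofs are below) =====
def Claim_equal_podaj_gracza_z_najwieksza_liczba_punktow : Prop := ∀ (ruchy : List (List String)) (plansza : List (List Int)), Dom_podaj_gracza_z_najwieksza_liczba_punktow ruchy plansza → Pre_podaj_gracza_z_najwieksza_liczba_punktow ruchy plansza → Spec_podaj_gracza_z_najwieksza_liczba_punktow ruchy plansza (podaj_gracza_z_najwieksza_liczba_punktow ruchy plansza)

-- ===== LEMMAS AND PROOFS =====
-- A's four sequential ifs compute exactly the delta looked up in B's dict
lemma pv_step_eq (r : String) (p : Int × Int) :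
    pvA_wykonaj_ruch r p
      = (p.1 + (PySem.Dict.getD pvB_delty r (0, 0)).1, p.2 + (PySem.Dict.getD pvB_delty r (0, 0)).2) := by
  have hmk : pvB_delty = PySem.Dict.mk
      [("N", (-1, 0)), ("E", (0, 1)), ("S", (1, 0)), ("W", (0, -1))] := rfl
  by_cases hN : r = "N" <;> by_cases hE : r = "E" <;> by_cases hS : r = "S" <;> by_cases hW : r = "W" <;>
    simp_all [pvA_wykonaj_ruch, hmk, PySem.Dict.getD, PySem.Dict.get?, beq_iff_eq, ne_comm] <;> omega

-- scanl always begins with its seed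
lemma pv_scanl_head_tail {α β : Type} (f : α → β → α) (b : α) (l : List β) :
    List.scanl f b l = b :: (List.scanl f b l).tail := by
  cases l <;> simp [List.scanl]

-- A's interleaved simulate-check-accumulate loop (with break) from any position and running score
-- equals B's staged computation on the materialised path from that position
lemma pv_inner_eq (plansza : List (List Int)) (m : List String) (w k s : Int) :
    pvA_inner plansza m (w, k) s
      = (let kroki := (List.scanl
            (fun p r =>
              let d := PySem.Dict.getD pvB_delty r (0, 0)
              (p.1 + d.1, p.2 + d.2)) (w, k) m).tail
         if kroki.all pvB_inB then
           s + (kroki.map (fun p => PySem.List.pyGetD (PySem.List.pyGetD plansza p.1 []) p.2 0)).sum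
         else -1) := by
  induction m generalizing w k s with
  | nil => simp [pvA_inner, List.scanl_nil]
  | cons r rest ih =>
    simp only [pvA_inner, pv_step_eq, List.scanl_cons, List.tail_cons]
    rw [pv_scanl_head_tail]
    set d := PySem.Dict.getD pvB_delty r (0, 0) with hd
    by_cases h : 0 ≤ w + d.1 ∧ w + d.1 ≤ 19 ∧ 0 ≤ k + d.2 ∧ k + d.2 ≤ 19
    · rw [if_neg (by omega)]
      rw [ih]
      have hin : pvB_inB (w + d.1, k + d.2) = true := by
        simp [pvB_inB]; omega
      simp only [List.all_cons, hin, Bool.true_and, List.map_cons, List.sum_cons]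
      split_ifs <;> [omega; rfl]
    · rw [if_pos (by omega)]
      have hin : pvB_inB (w + d.1, k + d.2) = false := by
        simp [pvB_inB]; omega
      simp [hin]

-- the running-best fold over the enumerated scores equals the max/first-index selection
lemma pv_sel (l : List Int) : ∀ (s : Int) (st : Int × Int),
    (PySem.List.enumerate l s).foldl
      (fun (st : Int × Int) ip => if ip.2 > st.2 then (ip.1 + 1, ip.2) else st) st
    = (PySem.List.max? l (fun x => x)).elim st
        (fun m => if m > st.2 then (s + (((PySem.List.index? l m).getD 0 : Nat) : Int) + 1, m) else st) := by
  induction l with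
  | nil => intro s st; simp [PySem.List.enumerate_nil, PySem.List.max?]
  | cons a t ih =>
    intro s st
    rw [PySem.List.enumerate_cons, List.foldl_cons]
    rw [show (if (s, a).2 > st.2 then ((s, a).1 + 1, (s, a).2) else st)
        = if a > st.2 then (s + 1, a) else st from rfl, ih (s + 1)]
    cases t with
    | nil =>
      simp only [PySem.List.max?, Option.elim, PySem.List.index?_eq_idxOf?]
      by_cases h : a > st.2 <;> simp [h, List.idxOf?]
    | cons b t' =>
      have hfold : ∀ (u : List Int) (x y : Int),
          List.foldl max (max x y) u = max x (List.foldl max y u) := by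
        intro u
        induction u with
        | nil => intro x y; rfl
        | cons c u' ihu =>
          intro x y
          simp only [List.foldl_cons, max_assoc, ihu]
      have hM : (b :: t').foldl max a = max a (t'.foldl max b) := by
        simp only [List.foldl_cons, hfold]
      set mt := t'.foldl max b with hmt
      have hmem : mt ∈ b :: t' := PySem.List.max?_mem (PySem.List.max?_id_cons b t')
      rw [PySem.List.max?_id_cons a (b :: t'), PySem.List.max?_id_cons b t', hM]
      simp only [Option.elim, ← hmt]
      obtain ⟨j, hj⟩ := (PySem.List.index?_isSome_iff (b :: t') mt).mpr hmem |> Option.isSome_iff_exists.mp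
      by_cases h1 : a > st.2
      · rw [if_pos h1]
        by_cases h2 : mt > a
        · have hma : max a mt = mt := max_eq_right (le_of_lt h2)
          rw [hma, if_pos (show mt > a from h2), if_pos (by omega)]
          have hne : a ≠ mt := by omega
          rw [PySem.List.index?_cons_of_ne _ hne, hj]
          simp only [Option.map_some, Option.getD_some]
          refine Prod.ext ?_ rfl
          push_cast
          omega
        · have hma : max a mt = a := max_eq_left (by omega)
          rw [hma, if_neg h2, if_pos h1]
          rw [PySem.List.index?_cons_self]
          simp only [Option.getD_some, Nat.cast_zero]
          refine Prod.ext ?_ rfl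
          omega
      · rw [if_neg h1]
        by_cases h2 : mt > st.2
        · have h2a : mt > a := by omega
          have hma : max a mt = mt := max_eq_right (le_of_lt h2a)
          rw [hma, if_pos h2, if_pos h2]
          have hne : a ≠ mt := by omega
          rw [PySem.List.index?_cons_of_ne _ hne, hj]
          simp only [Option.map_some, Option.getD_some]
          refine Prod.ext ?_ rfl
          push_cast
          omega
        · rw [if_neg h2]
          have hno : ¬ max a mt > st.2 := by
            simp only [gt_iff_lt, not_lt, max_le_iff]; omega
          rw [if_neg hno]

-- A's index loop over range(len(ruchy)) equals the fold over the enumerated score list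
lemma pv_outer_eq (ruchy : List (List String)) (plansza : List (List Int)) :
    (PySem.List.pyRange 0 (ruchy.length : Int) 1).foldl
      (fun (st : Int × Int) indeks_gracza =>
        let liczba := pvA_inner plansza (PySem.List.pyGetD ruchy indeks_gracza []) (0, 0)
          (PySem.List.pyGetD (PySem.List.pyGetD plansza 0 []) 0 0)
        if liczba > st.2 then (indeks_gracza + 1, liczba) else st) (0, 0)
    = (PySem.List.enumerate (ruchy.map (pvB_punkty_gracza plansza))).foldl
      (fun (st : Int × Int) ip => if ip.2 > st.2 then (ip.1 + 1, ip.2) else st) (0, 0) := by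
  rw [PySem.List.enumerate_eq_map_pyRange _ 0, List.foldl_map]
  simp only [PySem.List.len, List.length_map]
  apply PySem.List.foldl_congr_mem
  intro acc i hi
  rw [PySem.List.mem_pyRange_one] at hi
  rw [PySem.List.pyGetD_eq_getElem _ 0 hi.1 (by simpa using hi.2),
      PySem.List.pyGetD_eq_getElem _ [] hi.1 hi.2]
  simp only [List.getElem_map]
  rw [pv_inner_eq]
  rfl

-- ===== VERDICT (by name: the statement is the Claim_ definition above) =====
theorem podaj_gracza_z_najwieksza_liczba_punktow_spec : Claim_equal_podaj_gracza_z_najwieksza_liczba_punktow := by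
  intro ruchy plansza _ _
  unfold Spec_podaj_gracza_z_najwieksza_liczba_punktow
  simp only [podaj_gracza_z_najwieksza_liczba_punktow, podaj_gracza_z_najwieksza_liczba_punktow_alt]
  rw [pv_outer_eq, pv_sel _ 0 (0, 0)]
  cases hmx : PySem.List.max? (ruchy.map (pvB_punkty_gracza plansza)) (fun x => x) with
  | none => rfl
  | some m =>
    simp only [Option.elim]
    by_cases hm : m > 0
    · rw [if_pos hm, if_pos hm]
      norm_num
    · rw [if_neg hm, if_neg hm]
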